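-- pv_equiv track=rewrite | github.com/oceanusXXD/Comp6713-Ddi-Ade-Extraction | src/baseline/run_baseline.py | choose_nearest_drug
-- ===== SOURCE A (Python) =====
-- from typing import Any, Dict, List, Set, Tuple
--
-- def token_distance(m1: Dict[str, Any], m2: Dict[str, Any]) -> int:
--     """
--     Minimum token distance between mentions; 0 if overlapping
--     """
--     if m1["end_token"] < m2["start_token"]:
--         return m2["start_token"] - m1["end_token"]
--     if m2["end_token"] < m1["start_token"]:
--         return m1["start_token"] - m2["end_token"]
--     return 0
--
-- def choose_nearest_drug(effect_mention: Dict[str, Any], drug_mentions: List[Dict[str, Any]], max_distance: int):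
--     candidates = []
--     for drug in drug_mentions:
--         dist = token_distance(effect_mention, drug)
--         if dist <= max_distance:
--             candidates.append((dist, drug["start_token"], drug))
--     if not candidates:
--         return None
--     candidates.sort(key=lambda x: (x[0], x[1]))
--     return candidates[0][2]
-- ===== SOURCE B (Python) =====
-- from typing import Any, Dict, List
--
-- def token_distance(m1: Dict[str, Any], m2: Dict[str, Any]) -> int:
--     if m1["end_token"] < m2["start_token"]:
--         return m2["start_token"] - m1["end_token"]
--     if m2["end_token"] < m1["start_token"]:
--         return m1["start_token"] - m2["end_token"]
--     return 0
--
-- def choose_nearest_drug(effect_mention: Dict[str, Any], drug_mentions: List[Dict[str, Any]], max_distance: int):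
--     # single-pass argmin over (distance, start_token); first-seen wins ties via strict <
--     best = None  # (dist, start_token, drug)
--     for drug in drug_mentions:
--         dist = token_distance(effect_mention, drug)
--         if dist <= max_distance:
--             start = drug["start_token"]
--             if best is None or dist < best[0] or (dist == best[0] and start < best[1]):
--                 best = (dist, start, drug)
--     return None if best is None else best[2]
-- ===== Notes on version B (the rewrite author's own statement) =====
-- stated objective: faster
-- what changed: Replaces build-candidate-list-then-stable-sort-and-take-first with a single-pass argmin that keeps only the best (distance, start_token) triple, breaking ties with strict < so the first-encountered drug wins exactly as the stable sort does.
import Mathlib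
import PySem

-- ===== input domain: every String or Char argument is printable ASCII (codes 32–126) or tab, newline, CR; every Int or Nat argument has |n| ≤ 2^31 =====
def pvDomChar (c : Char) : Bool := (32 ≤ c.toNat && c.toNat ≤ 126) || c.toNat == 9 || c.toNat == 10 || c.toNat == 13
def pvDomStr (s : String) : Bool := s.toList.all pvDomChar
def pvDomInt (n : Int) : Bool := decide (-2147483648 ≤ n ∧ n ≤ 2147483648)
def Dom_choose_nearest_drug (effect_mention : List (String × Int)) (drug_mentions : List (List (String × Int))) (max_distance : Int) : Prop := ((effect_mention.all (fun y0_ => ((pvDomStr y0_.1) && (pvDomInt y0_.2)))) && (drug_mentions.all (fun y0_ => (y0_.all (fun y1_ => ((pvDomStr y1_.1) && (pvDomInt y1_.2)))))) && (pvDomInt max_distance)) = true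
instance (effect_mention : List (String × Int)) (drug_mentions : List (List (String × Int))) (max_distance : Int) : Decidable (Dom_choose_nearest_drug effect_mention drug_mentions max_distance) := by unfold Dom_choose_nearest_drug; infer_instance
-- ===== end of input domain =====

-- B replaces A's build-candidate-list-then-stable-sort-and-take-first by a single-pass
-- argmin on the key (distance, start_token) with strict-< updates (first-seen wins ties): faster (one pass, no sort).


-- ===== PORT A =====
-- m[k] for the mention dicts; Pre_ guarantees the key is present at every lookup the Python
-- actually evaluates (KeyError inputs are outside Pre_), so the 0 default is never used.
def dget (m : List (String × Int)) (k : String) : Int := ((PySem.Dict.mk m).get? k).getD 0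

-- helper of both Pythons (identical code in Source A and Source B)
def token_distance (m1 : List (String × Int)) (m2 : List (String × Int)) : Int :=
  if dget m1 "end_token" < dget m2 "start_token" then dget m2 "start_token" - dget m1 "end_token"
  else if dget m2 "end_token" < dget m1 "start_token" then dget m1 "start_token" - dget m2 "end_token"
  else 0

def choose_nearest_drug (effect_mention : List (String × Int)) (drug_mentions : List (List (String × Int))) (max_distance : Int) : Option (List (String × Int)) :=
  let candidates := drug_mentions.foldl (fun acc drug =>
    let dist := token_distance effect_mention drug
    if dist ≤ max_distance then acc ++ [(dist, dget drug "start_token", drug)] else acc) []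
  if candidates = [] then none
  else ((PySem.List.sorted2 candidates (fun t => t.1) (fun t => t.2.1)).head?).map (fun t => t.2.2)

-- ===== PORT B =====
def choose_nearest_drug_alt (effect_mention : List (String × Int)) (drug_mentions : List (List (String × Int))) (max_distance : Int) : Option (List (String × Int)) :=
  let best := drug_mentions.foldl (fun best drug =>
    let dist := token_distance effect_mention drug
    if dist ≤ max_distance then
      let start := dget drug "start_token"
      match best with
      | none => some (dist, start, drug)
      | some b => if dist < b.1 ∨ (dist = b.1 ∧ start < b.2.1) then some (dist, start, drug) else best
    else best) (none : Option (Int × Int × List (String × Int)))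
  best.map (fun b => b.2.2)

-- ===== PRECONDITION & SPEC =====
-- Pre_ = exactly the inputs on which Python A raises no KeyError, following its evaluation order:
-- for every drug, effect["end_token"] and drug["start_token"] must exist; drug["end_token"] and
-- effect["start_token"] are only evaluated when the first comparison in token_distance is false.
def Pre_choose_nearest_drug (effect_mention : List (String × Int)) (drug_mentions : List (List (String × Int))) (max_distance : Int) : Prop :=
  (drug_mentions.all (fun d =>
    ((PySem.Dict.mk effect_mention).get? "end_token").isSome &&
    ((PySem.Dict.mk d).get? "start_token").isSome &&
    (decide (dget effect_mention "end_token" < dget d "start_token") ||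
      (((PySem.Dict.mk d).get? "end_token").isSome &&
       ((PySem.Dict.mk effect_mention).get? "start_token").isSome)))) = true
instance (effect_mention : List (String × Int)) (drug_mentions : List (List (String × Int))) (max_distance : Int) : Decidable (Pre_choose_nearest_drug effect_mention drug_mentions max_distance) := by unfold Pre_choose_nearest_drug; infer_instance

def pvWitness_choose_nearest_drug : (List (String × Int)) × (List (List (String × Int))) × Int :=
  ([("start_token", 0), ("end_token", 1)], [[("start_token", 3), ("end_token", 4)], [("start_token", 2), ("end_token", 2)]], 5)

def Spec_choose_nearest_drug (effect_mention : List (String × Int)) (drug_mentions : List (List (String × Int))) (max_distance : Int) (out : Option (List (String × Int))) : Prop := out = choose_nearest_drug_alt effect_mention drug_mentions max_distance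
instance (effect_mention : List (String × Int)) (drug_mentions : List (List (String × Int))) (max_distance : Int) (out : Option (List (String × Int))) : Decidable (Spec_choose_nearest_drug effect_mention drug_mentions max_distance out) := by unfold Spec_choose_nearest_drug; infer_instance

-- ===== CLAIM (what is proved, stated in full; the proofs are below) =====
def Claim_equal_choose_nearest_drug : Prop := ∀ (effect_mention : List (String × Int)) (drug_mentions : List (List (String × Int))) (max_distance : Int), Dom_choose_nearest_drug effect_mention drug_mentions max_distance → Pre_choose_nearest_drug effect_mention drug_mentions max_distance → Spec_choose_nearest_drug effect_mention drug_mentions max_distance (choose_nearest_drug effect_mention drug_mentions max_distance)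

-- ===== LEMMAS AND PROOFS =====

-- the Boolean lexicographic "key a < key b" test sorted2 uses on the key (t.1, t.2.1)
def pvLt {β : Type} (a b : Int × Int × β) : Bool :=
  decide (a.1 < b.1) || !decide (b.1 < a.1) && decide (a.2.1 < b.2.1)

-- running first-min step under pvLt (strict <, so the earlier element wins ties)
def pvMin {β : Type} (o : Option (Int × Int × β)) (x : Int × Int × β) : Option (Int × Int × β) :=
  match o with
  | none => some x
  | some m => if pvLt x m then some x else some m

-- A's loop body (lets inlined; definitionally equal to the lambda in choose_nearest_drug)
def astep (em : List (String × Int)) (maxd : Int)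
    (acc : List (Int × Int × List (String × Int))) (drug : List (String × Int)) :
    List (Int × Int × List (String × Int)) :=
  if token_distance em drug ≤ maxd then acc ++ [(token_distance em drug, dget drug "start_token", drug)] else acc

-- B's loop body (lets inlined; definitionally equal to the lambda in choose_nearest_drug_alt)
def bstep (em : List (String × Int)) (maxd : Int)
    (best : Option (Int × Int × List (String × Int))) (drug : List (String × Int)) :
    Option (Int × Int × List (String × Int)) :=
  if token_distance em drug ≤ maxd then
    match best with
    | none => some (token_distance em drug, dget drug "start_token", drug)
    | some b =>
      if token_distance em drug < b.1 ∨ (token_distance em drug = b.1 ∧ dget drug "start_token" < b.2.1) then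
        some (token_distance em drug, dget drug "start_token", drug)
      else best
  else best

lemma pvLt_eq {β : Type} (t b : Int × Int × β) :
    pvLt t b = decide (t.1 < b.1 ∨ (t.1 = b.1 ∧ t.2.1 < b.2.1)) := by
  unfold pvLt
  by_cases h1 : t.1 < b.1 <;> by_cases h2 : b.1 < t.1 <;> by_cases h3 : t.2.1 < b.2.1 <;>
    simp [h1, h2, h3] <;> omega

lemma pvMin_some_eq {β : Type} (x b : Int × Int × β) :
    pvMin (some b) x = if x.1 < b.1 ∨ (x.1 = b.1 ∧ x.2.1 < b.2.1) then some x else some b := by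
  show (if pvLt x b then some x else some b) = _
  rw [pvLt_eq]
  simp only [decide_eq_true_eq]

lemma head_insertBy_pv {β : Type} (x : Int × Int × β) (acc : List (Int × Int × β)) :
    (PySem.List.insertBy pvLt x acc).head? = pvMin acc.head? x := by
  cases acc with
  | nil => rfl
  | cons y ys =>
    by_cases h : pvLt x y = true <;> simp [PySem.List.insertBy, pvMin, h]

lemma head_foldl_insertBy_pv {β : Type} :
    ∀ (c acc : List (Int × Int × β)),
      (c.foldl (fun a x => PySem.List.insertBy pvLt x a) acc).head? = c.foldl pvMin acc.head? := by
  intro c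
  induction c with
  | nil => intro acc; rfl
  | cons x t ih =>
    intro acc
    simp only [List.foldl_cons]
    rw [ih, head_insertBy_pv]

-- head of the stable sort = running first-min under the same lexicographic key
lemma pv_sorted_head {β : Type} (c : List (Int × Int × β)) :
    ((PySem.List.sorted2 c (fun t => t.1) (fun t => t.2.1)).head?) = c.foldl pvMin none := by
  have h : PySem.List.sorted2 c (fun t => t.1) (fun t => t.2.1) =
      c.foldl (fun a x => PySem.List.insertBy pvLt x a) [] := rfl
  rw [h, head_foldl_insertBy_pv]
  rfl

-- loop invariant: the first-min of A's accumulated candidate list = B's fold continued from the current best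
lemma pv_loop (em : List (String × Int)) (maxd : Int) :
    ∀ (dms : List (List (String × Int))) (acc : List (Int × Int × List (String × Int))),
      ((dms.foldl (astep em maxd) acc).foldl pvMin none) =
        dms.foldl (bstep em maxd) (acc.foldl pvMin none) := by
  intro dms
  induction dms with
  | nil => intro acc; rfl
  | cons d t ih =>
    intro acc
    simp only [List.foldl_cons]
    rw [ih]
    congr 1
    unfold astep bstep
    by_cases h : token_distance em d ≤ maxd
    · rw [if_pos h, if_pos h, List.foldl_append]
      cases hb : List.foldl pvMin none acc with
      | none => rfl
      | some b => exact pvMin_some_eq _ b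
    · rw [if_neg h, if_neg h]

lemma pv_loop_nil (em : List (String × Int)) (maxd : Int) (dms : List (List (String × Int))) :
    ((dms.foldl (astep em maxd) []).foldl pvMin none) = dms.foldl (bstep em maxd) none := by
  simpa using pv_loop em maxd dms []

-- ===== VERDICT (by name: the statement is the Claim_ definition above) =====
theorem choose_nearest_drug_spec : Claim_equal_choose_nearest_drug := by
  intro em dms maxd _dom _pre
  show choose_nearest_drug em dms maxd = choose_nearest_drug_alt em dms maxd
  show (if dms.foldl (astep em maxd) [] = [] then none
        else ((PySem.List.sorted2 (dms.foldl (astep em maxd) []) (fun t => t.1) (fun t => t.2.1)).head?).map (fun t => t.2.2)) =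
      (dms.foldl (bstep em maxd) none).map (fun b => b.2.2)
  rw [← pv_loop_nil em maxd dms]
  by_cases h : dms.foldl (astep em maxd) [] = []
  · rw [if_pos h, h]; rfl
  · rw [if_neg h, pv_sorted_head]
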